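-- pv_equiv track=rewrite | github.com/NKhank11/Gem-Hunter | createCNF.py | apply_solution_to_board
-- ===== SOURCE A (Python) =====
-- def apply_solution_to_board(board, solution, var_map):
--     result = []
--     for i in range(len(board)):
--         row = []
--         for j in range(len(board[0])):
--             if board[i][j] == '_':
--                 var_id = var_map.get((i, j))
--                 # Check if the variable is in the solution
--                 if var_id in solution:
--                     row.append('T')  # Trap
--                 else:
--                     row.append('G')  # Gem
--             else:
--                 row.append(board[i][j])
--         result.append(row)
--     return result
-- ===== SOURCE B (Python) =====
-- def apply_solution_to_board(board, solution, var_map):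
--     # Default pass: copy the grid (normalized to the width of the first row),
--     # turning every unknown '_' cell into 'G'; then overlay 'T' from var_map.
--     if not board:
--         return []
--     w = len(board[0])
--     result = [['G' if c == '_' else c for c in row[:w]] for row in board]
--     for (i, j), v in var_map.items():
--         if 0 <= i < len(board) and 0 <= j < w and board[i][j] == '_' and v in solution:
--             result[i][j] = 'T'
--     return result
-- ===== Notes on version B (the rewrite author's own statement) =====
-- stated objective: alternative
-- what changed: Instead of scanning every cell and branching with a dict lookup plus a solution-membership scan per cell, B builds the whole result in one copy pass ('_' -> 'G' default, rows normalized to the grid width) and then overlays 'T' only at the var_map entries that are in-grid '_' cells with their variable in the solution.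
import Mathlib
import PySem

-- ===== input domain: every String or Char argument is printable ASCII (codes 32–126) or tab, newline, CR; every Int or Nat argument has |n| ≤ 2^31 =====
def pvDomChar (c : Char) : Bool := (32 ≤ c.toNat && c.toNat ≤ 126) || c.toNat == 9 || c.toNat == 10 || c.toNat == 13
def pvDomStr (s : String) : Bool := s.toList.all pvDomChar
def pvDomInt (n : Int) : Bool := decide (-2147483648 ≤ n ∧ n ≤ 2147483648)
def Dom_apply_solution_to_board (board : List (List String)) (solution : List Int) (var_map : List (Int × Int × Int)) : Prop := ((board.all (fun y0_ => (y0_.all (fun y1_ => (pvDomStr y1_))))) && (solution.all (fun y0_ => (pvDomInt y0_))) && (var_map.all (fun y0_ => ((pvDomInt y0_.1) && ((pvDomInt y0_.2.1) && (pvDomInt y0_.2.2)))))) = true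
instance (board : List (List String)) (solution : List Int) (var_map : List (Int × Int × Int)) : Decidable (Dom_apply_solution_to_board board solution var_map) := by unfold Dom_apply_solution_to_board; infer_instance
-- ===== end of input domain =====

-- B replaces A's per-cell branch-and-lookup scan by a one-pass default copy plus an overlay
-- of 'T' driven by var_map (objective: alternative decomposition, same results).

-- ===== PORT A =====
-- var_map.get((i, j)) : first entry of the association list whose key is (i, j)
def lookupVM (vm : List (Int × Int × Int)) (i j : Int) : Option Int :=
  (vm.find? (fun t => t.1 == i && t.2.1 == j)).map (fun t => t.2.2)

-- literal port of A: for each i in range(len(board)), for each j in range(len(board[0])),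
-- branch on board[i][j] == '_' and on 'var_id in solution' (None is never in a list of ints).
-- board[i][j] is read with getD; on Pre_ the indices are in range so this equals Python's access.
def apply_solution_to_board (board : List (List String)) (solution : List Int) (var_map : List (Int × Int × Int)) : List (List String) :=
  (List.range board.length).map (fun i =>
    (List.range (board.headD []).length).map (fun j =>
      let cell := (board.getD i []).getD j ""
      if cell = "_" then
        match lookupVM var_map (i : Int) (j : Int) with
        | some v => if v ∈ solution then "T" else "G"
        | none => "G"
      else cell))

-- ===== PORT B =====
-- one overlay step: result[i][j] = 'T' when the entry is an in-grid '_' cell whose var is in solution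
def altStep (board : List (List String)) (solution : List Int) (w : Nat)
    (res : List (List String)) (t : Int × Int × Int) : List (List String) :=
  if 0 ≤ t.1 ∧ t.1 < (board.length : Int) ∧ 0 ≤ t.2.1 ∧ t.2.1 < (w : Int) ∧
     (board.getD t.1.toNat []).getD t.2.1.toNat "" = "_" ∧ t.2.2 ∈ solution
  then res.modify t.1.toNat (fun row => row.set t.2.1.toNat "T") else res

def apply_solution_to_board_alt (board : List (List String)) (solution : List Int) (var_map : List (Int × Int × Int)) : List (List String) :=
  if board = [] then []
  else
    let w := (board.headD []).length
    let init := board.map (fun row => (row.take w).map (fun c => if c = "_" then "G" else c))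
    var_map.foldl (altStep board solution w) init

-- ===== PRECONDITION & SPEC =====
-- Pre_ excludes (a) boards with a row shorter than the first row, on which Python A raises
-- IndexError, and (b) var_map association lists with duplicate (i, j) keys, which represent no
-- Python dict: there A's first-match reading and B's overlay order are both accidental.
def Pre_apply_solution_to_board (board : List (List String)) (_solution : List Int) (var_map : List (Int × Int × Int)) : Prop :=
  (∀ row ∈ board, (board.headD []).length ≤ row.length) ∧
  (var_map.map (fun t => (t.1, t.2.1))).Nodup
instance (board : List (List String)) (solution : List Int) (var_map : List (Int × Int × Int)) : Decidable (Pre_apply_solution_to_board board solution var_map) := by unfold Pre_apply_solution_to_board; infer_instance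

def pvWitness_apply_solution_to_board : List (List String) × List Int × (List (Int × Int × Int)) :=
  ([["_", "1"], ["_", "_"]], [5, 7], [(0, 0, 5), (1, 1, 9), (0, 1, 7)])

def Spec_apply_solution_to_board (board : List (List String)) (solution : List Int) (var_map : List (Int × Int × Int)) (out : List (List String)) : Prop := out = apply_solution_to_board_alt board solution var_map
instance (board : List (List String)) (solution : List Int) (var_map : List (Int × Int × Int)) (out : List (List String)) : Decidable (Spec_apply_solution_to_board board solution var_map out) := by unfold Spec_apply_solution_to_board; infer_instance

-- ===== CLAIM (what is proved, stated in full; the proofs are below) =====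
def Claim_equal_apply_solution_to_board : Prop := ∀ (board : List (List String)) (solution : List Int) (var_map : List (Int × Int × Int)), Dom_apply_solution_to_board board solution var_map → Pre_apply_solution_to_board board solution var_map → Spec_apply_solution_to_board board solution var_map (apply_solution_to_board board solution var_map)

-- ===== LEMMAS AND PROOFS =====

-- the overlay condition of one var_map entry, aimed at cell (i, j)
abbrev hitsCell (board : List (List String)) (solution : List Int) (w : Nat)
    (i j : Nat) (t : Int × Int × Int) : Prop :=
  (0 ≤ t.1 ∧ t.1 < (board.length : Int) ∧ 0 ≤ t.2.1 ∧ t.2.1 < (w : Int) ∧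
   (board.getD t.1.toNat []).getD t.2.1.toNat "" = "_" ∧ t.2.2 ∈ solution) ∧
  t.1.toNat = i ∧ t.2.1.toNat = j

-- peek at cell (i, j) through getElem?, total on any state
def peek (res : List (List String)) (i j : Nat) : Option String :=
  res[i]?.bind (fun r => r[j]?)

theorem peek_altStep (board : List (List String)) (solution : List Int) (w : Nat)
    (res : List (List String)) (t : Int × Int × Int) (i j : Nat) :
    peek (altStep board solution w res t) i j =
      if hitsCell board solution w i j t then (peek res i j).map (fun _ => "T")
      else peek res i j := by
  unfold altStep hitsCell peek
  by_cases hc : 0 ≤ t.1 ∧ t.1 < (board.length : Int) ∧ 0 ≤ t.2.1 ∧ t.2.1 < (w : Int) ∧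
      (board.getD t.1.toNat []).getD t.2.1.toNat "" = "_" ∧ t.2.2 ∈ solution
  · rw [if_pos hc, List.getElem?_modify]
    by_cases hi : t.1.toNat = i
    · subst hi
      by_cases hj : t.2.1.toNat = j
      · subst hj
        rw [if_pos ⟨hc, rfl, rfl⟩]
        cases hres : res[t.1.toNat]? with
        | none => simp
        | some r =>
          by_cases hlt : t.2.1.toNat < r.length
          · simp [List.getElem?_set, hlt, List.getElem?_eq_getElem hlt]
          · simp [List.getElem?_set, hlt, List.getElem?_eq_none_iff.mpr (Nat.le_of_not_lt hlt)]
      · rw [if_neg (fun h => hj h.2.2)]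
        cases hres : res[t.1.toNat]? with
        | none => simp
        | some r => simp [hj]
    · rw [if_neg (fun h => hi h.2.1)]
      cases hres : res[i]? with
      | none => simp
      | some r => simp [hi]
  · rw [if_neg hc, if_neg (fun h => hc h.1)]

theorem peek_foldl (board : List (List String)) (solution : List Int) (w : Nat)
    (l : List (Int × Int × Int)) :
    ∀ (res : List (List String)) (i j : Nat),
    peek (l.foldl (altStep board solution w) res) i j =
      if ∃ t ∈ l, hitsCell board solution w i j t then (peek res i j).map (fun _ => "T")
      else peek res i j := by
  induction l with
  | nil => intro res i j; simp
  | cons t l ih =>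
    intro res i j
    rw [List.foldl_cons, ih, peek_altStep]
    have hmem : t ∈ t :: l := List.mem_cons.mpr (Or.inl rfl)
    by_cases ht : hitsCell board solution w i j t
    · rw [if_pos ht,
        if_pos (show ∃ u ∈ t :: l, hitsCell board solution w i j u from ⟨t, hmem, ht⟩)]
      by_cases hl : ∃ u ∈ l, hitsCell board solution w i j u
      · rw [if_pos hl, Option.map_map]; rfl
      · rw [if_neg hl]
    · rw [if_neg ht]
      by_cases hl : ∃ u ∈ l, hitsCell board solution w i j u
      · rw [if_pos hl, if_pos (by obtain ⟨u, hu, h⟩ := hl; exact ⟨u, List.mem_cons_of_mem _ hu, h⟩)]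
      · rw [if_neg hl]
        have hnone : ¬∃ u ∈ t :: l, hitsCell board solution w i j u := by
          rintro ⟨u, hu, h⟩
          rcases List.mem_cons.mp hu with rfl | hu'
          · exact ht h
          · exact hl ⟨u, hu', h⟩
        rw [if_neg hnone]

theorem length_altStep (board : List (List String)) (solution : List Int) (w : Nat)
    (res : List (List String)) (t : Int × Int × Int) :
    (altStep board solution w res t).length = res.length := by
  unfold altStep; split <;> simp

theorem length_foldl_altStep (board : List (List String)) (solution : List Int) (w : Nat)
    (l : List (Int × Int × Int)) :
    ∀ res : List (List String), (l.foldl (altStep board solution w) res).length = res.length := by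
  induction l with
  | nil => intro res; rfl
  | cons t l ih => intro res; rw [List.foldl_cons, ih, length_altStep]

theorem rowlen_altStep (board : List (List String)) (solution : List Int) (w : Nat)
    (res : List (List String)) (t : Int × Int × Int) (i : Nat) :
    ((altStep board solution w res t)[i]?).map List.length = (res[i]?).map List.length := by
  unfold altStep; split
  · rw [List.getElem?_modify]
    cases res[i]? with
    | none => simp
    | some r => simp only [Option.map_some]; split <;> simp
  · rfl

theorem rowlen_foldl_altStep (board : List (List String)) (solution : List Int) (w : Nat)
    (l : List (Int × Int × Int)) :
    ∀ (res : List (List String)) (i : Nat),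
    ((l.foldl (altStep board solution w) res)[i]?).map List.length = (res[i]?).map List.length := by
  induction l with
  | nil => intro res i; rfl
  | cons t l ih => intro res i; rw [List.foldl_cons, ih, rowlen_altStep]

-- with pairwise-distinct keys, find? of a member's key returns exactly that member
theorem find?_key_of_nodup (vm : List (Int × Int × Int))
    (hn : (vm.map (fun t => (t.1, t.2.1))).Nodup) (t : Int × Int × Int) (ht : t ∈ vm) :
    vm.find? (fun u => u.1 == t.1 && u.2.1 == t.2.1) = some t := by
  induction vm with
  | nil => cases ht
  | cons u l ih =>
    rcases List.mem_cons.mp ht with rfl | htl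
    · simp
    · rw [List.map_cons, List.nodup_cons] at hn
      have hkey : (u.1, u.2.1) ≠ (t.1, t.2.1) := by
        intro he
        exact hn.1 (by rw [he]; exact List.mem_map.mpr ⟨t, htl, rfl⟩)
      have hpred : (u.1 == t.1 && u.2.1 == t.2.1) = false := by
        by_contra hcon
        have h2 := Bool.and_eq_true_iff.mp (Bool.of_not_eq_false hcon)
        exact hkey (by rw [Prod.mk.injEq]
                       exact ⟨beq_iff_eq.mp h2.1, beq_iff_eq.mp h2.2⟩)
      rw [List.find?_cons, hpred]
      exact ih hn.2 htl

-- the nonempty-board case, with the grid width and the overlay start written out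
theorem main_aux (board : List (List String)) (solution : List Int) (var_map : List (Int × Int × Int))
    (w : Nat) (hw : (board.headD []).length = w)
    (hrows : ∀ row ∈ board, w ≤ row.length)
    (hnodup : (var_map.map (fun t => (t.1, t.2.1))).Nodup) :
    apply_solution_to_board board solution var_map =
      var_map.foldl (altStep board solution w)
        (board.map (fun (row : List String) => (row.take w).map (fun c => if c = "_" then "G" else c))) := by
  have hlA : (apply_solution_to_board board solution var_map).length = board.length := by
    simp [apply_solution_to_board]
  have hlB : (var_map.foldl (altStep board solution w)
      (board.map (fun (row : List String) => (row.take w).map (fun c => if c = "_" then "G" else c)))).length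
      = board.length := by
    rw [length_foldl_altStep]; simp
  apply List.ext_getElem (by rw [hlA, hlB])
  intro i h1 h2
  have hi : i < board.length := by rw [hlA] at h1; exact h1
  have hAi : (apply_solution_to_board board solution var_map)[i]'h1 =
      (List.range w).map (fun j =>
        let cell := (board.getD i []).getD j ""
        if cell = "_" then
          match lookupVM var_map (i : Int) (j : Int) with
          | some v => if v ∈ solution then "T" else "G"
          | none => "G"
        else cell) := by
    simp only [apply_solution_to_board]
    rw [List.getElem_map (h := by simpa using hi), List.getElem_range, hw]
  have hEi : i < (board.map (fun (row : List String) => (row.take w).map (fun c => if c = "_" then "G" else c))).length := by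
    simpa using hi
  have hEilen : ((board.map (fun (row : List String) => (row.take w).map (fun c => if c = "_" then "G" else c)))[i]'hEi).length = w := by
    simp only [List.getElem_map, List.length_map, List.length_take]
    exact Nat.min_eq_left (hrows _ (List.getElem_mem hi))
  have hrlB : ((var_map.foldl (altStep board solution w)
      (board.map (fun (row : List String) => (row.take w).map (fun c => if c = "_" then "G" else c))))[i]'h2).length = w := by
    have h := rowlen_foldl_altStep board solution w var_map
      (board.map (fun (row : List String) => (row.take w).map (fun c => if c = "_" then "G" else c))) i
    rw [List.getElem?_eq_getElem h2, List.getElem?_eq_getElem hEi] at h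
    simp only [Option.map_some, Option.some.injEq] at h
    rw [h, hEilen]
  apply List.ext_getElem (by rw [hrlB, hAi]; simp)
  intro j hj1 hj2
  have hjw : j < w := by rw [hrlB] at hj2; exact hj2
  have hjlen : j < (board[i]'hi).length := Nat.lt_of_lt_of_le hjw (hrows _ (List.getElem_mem hi))
  -- compare the two cells through getElem?
  suffices hsome : ((apply_solution_to_board board solution var_map)[i]'h1)[j]? =
      (((var_map.foldl (altStep board solution w)
        (board.map (fun (row : List String) => (row.take w).map (fun c => if c = "_" then "G" else c))))[i]'h2))[j]? by
    rw [List.getElem?_eq_getElem hj1, List.getElem?_eq_getElem hj2] at hsome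
    exact Option.some.inj hsome
  have hgd : (board.getD i []).getD j "" = (board[i]'hi)[j]'hjlen := by
    rw [List.getD_eq_getElem board [] hi, List.getD_eq_getElem _ "" hjlen]
  -- A-side cell
  have hAij : ((apply_solution_to_board board solution var_map)[i]'h1)[j]? =
      some (if (board[i]'hi)[j]'hjlen = "_" then
          match lookupVM var_map (i : Int) (j : Int) with
          | some v => if v ∈ solution then "T" else "G"
          | none => "G"
        else (board[i]'hi)[j]'hjlen) := by
    rw [hAi, List.getElem?_map, List.getElem?_range hjw, Option.map_some]
    simp only [hgd]
  -- B-side cell via the peek characterization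
  have hpeekE : peek (board.map (fun (row : List String) => (row.take w).map (fun c => if c = "_" then "G" else c))) i j =
      some (if (board[i]'hi)[j]'hjlen = "_" then "G" else (board[i]'hi)[j]'hjlen) := by
    unfold peek
    rw [List.getElem?_map, List.getElem?_eq_getElem hi, Option.map_some, Option.bind_some,
        List.getElem?_map, List.getElem?_take_of_lt hjw, List.getElem?_eq_getElem hjlen,
        Option.map_some]
  have hmain := peek_foldl board solution w var_map
    (board.map (fun (row : List String) => (row.take w).map (fun c => if c = "_" then "G" else c))) i j
  unfold peek at hmain
  rw [List.getElem?_eq_getElem h2, Option.bind_some] at hmain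
  have hpeekE' := hpeekE
  unfold peek at hpeekE'
  rw [hpeekE'] at hmain
  rw [hAij, hmain]
  -- case analysis on the cell and the lookup
  by_cases hund : (board[i]'hi)[j]'hjlen = "_"
  · rw [if_pos hund]
    cases hlk : lookupVM var_map (i : Int) (j : Int) with
    | some v =>
      rw [show (match some v with
                | some v => if v ∈ solution then "T" else "G"
                | none => "G") = (if v ∈ solution then "T" else "G") from rfl]
      obtain ⟨t, hfind, hv⟩ : ∃ t, var_map.find? (fun u => u.1 == (i : Int) && u.2.1 == (j : Int)) = some t ∧ t.2.2 = v := by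
        unfold lookupVM at hlk
        cases hf : var_map.find? (fun u => u.1 == (i : Int) && u.2.1 == (j : Int)) with
        | none => rw [hf] at hlk; simp at hlk
        | some t => rw [hf] at hlk; exact ⟨t, rfl, by simpa using hlk⟩
      have htmem := List.mem_of_find?_eq_some hfind
      have hpred := List.find?_some hfind
      have hpeq : t.1 = (i : Int) ∧ t.2.1 = (j : Int) := by
        have h2' := Bool.and_eq_true_iff.mp hpred
        exact ⟨beq_iff_eq.mp h2'.1, beq_iff_eq.mp h2'.2⟩
      by_cases hvs : v ∈ solution
      · rw [if_pos hvs]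
        have hex : ∃ u ∈ var_map, hitsCell board solution w i j u := by
          refine ⟨t, htmem, ⟨⟨?_, ?_, ?_, ?_, ?_, ?_⟩, ?_, ?_⟩⟩
        
          · rw [hpeq.1]; exact Int.natCast_nonneg i
          · rw [hpeq.1]; exact_mod_cast hi
          · rw [hpeq.2]; exact Int.natCast_nonneg j
          · rw [hpeq.2]; exact_mod_cast hjw
          · rw [hpeq.1, hpeq.2]; simp only [Int.toNat_natCast]; rw [hgd]; exact hund
          · rw [hv]; exact hvs
          · rw [hpeq.1]; simp
          · rw [hpeq.2]; simp
        rw [if_pos hex, Option.map_some]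
      · rw [if_neg hvs]
        have hnex : ¬ ∃ u ∈ var_map, hitsCell board solution w i j u := by
          rintro ⟨u, hu, ⟨⟨h01, _, h02, _, _, husol⟩, hui, huj⟩⟩
          have hu1 : u.1 = (i : Int) := by omega
          have hu2 : u.2.1 = (j : Int) := by omega
          have hfu := find?_key_of_nodup var_map hnodup u hu
          rw [hu1, hu2, hfind] at hfu
          have : u = t := by simpa using hfu.symm
          rw [this, hv] at husol
          exact hvs husol
        rw [if_neg hnex, if_pos hund]
    | none =>
      rw [show (match (none : Option Int) with
                | some v => if v ∈ solution then "T" else "G"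
                | none => "G") = "G" from rfl]
      have hnex : ¬ ∃ u ∈ var_map, hitsCell board solution w i j u := by
        rintro ⟨u, hu, ⟨⟨h01, _, h02, _, _, _⟩, hui, huj⟩⟩
        have hu1 : u.1 = (i : Int) := by omega
        have hu2 : u.2.1 = (j : Int) := by omega
        have hfu := find?_key_of_nodup var_map hnodup u hu
        rw [hu1, hu2] at hfu
        unfold lookupVM at hlk
        rw [hfu] at hlk
        simp at hlk
      rw [if_neg hnex, if_pos hund]
  · rw [if_neg hund]
    have hnex : ¬ ∃ u ∈ var_map, hitsCell board solution w i j u := by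
      rintro ⟨u, hu, ⟨⟨h01, _, h02, _, hucell, _⟩, hui, huj⟩⟩
      rw [hui, huj] at hucell
      rw [hgd] at hucell
      exact hund hucell
    rw [if_neg hnex, if_neg hund]

-- ===== VERDICT (by name: the statement is the Claim_ definition above) =====
theorem apply_solution_to_board_spec : Claim_equal_apply_solution_to_board := by
  intro board solution var_map _ hpre
  obtain ⟨hrows, hnodup⟩ := hpre
  unfold Spec_apply_solution_to_board
  by_cases hb : board = []
  · subst hb; simp [apply_solution_to_board, apply_solution_to_board_alt]
  · unfold apply_solution_to_board_alt
    rw [if_neg hb]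
    exact main_aux board solution var_map (board.headD []).length rfl hrows hnodup
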